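-- pv_equiv track=rewrite | github.com/kerollaain/WEB___ | project/labs/lab4.py | find_longest_repeated_sequence
-- ===== SOURCE A (Python) =====
-- from collections import Counter
--
-- def find_longest_repeated_sequence(words, seq_length=3):
--     sequences = [' '.join(words[i:i + seq_length]) for i in range(len(words) - seq_length + 1)]
--     sequence_counts = Counter(sequences)
--     repeated_sequences = {seq: count for seq, count in sequence_counts.items() if count > 1}
--     if repeated_sequences:
--         longest_sequence = max(repeated_sequences, key=len)
--         return longest_sequence, repeated_sequences[longest_sequence]
--     return None
-- ===== SOURCE B (Python) =====
-- def find_longest_repeated_sequence(words, seq_length=3):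
--     seqs = [' '.join(words[i:i + seq_length]) for i in range(len(words) - seq_length + 1)]
--     best = None
--     while seqs:
--         s = seqs[0]
--         c = seqs.count(s)
--         if c > 1 and (best is None or len(s) > len(best[0])):
--             best = (s, c)
--         seqs = [t for t in seqs if t != s]
--     return best
-- ===== Notes on version B (the rewrite author's own statement) =====
-- stated objective: alternative
-- what changed: B keeps no Counter/dict/max stage at all: it repeatedly takes the first remaining window sequence, counts its occurrences directly with list.count, updates a running best (a strictly longer repeated sequence wins, so first occurrence keeps ties exactly like A's max), then filters all occurrences of that sequence out and loops until the list is empty.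
import Mathlib
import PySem

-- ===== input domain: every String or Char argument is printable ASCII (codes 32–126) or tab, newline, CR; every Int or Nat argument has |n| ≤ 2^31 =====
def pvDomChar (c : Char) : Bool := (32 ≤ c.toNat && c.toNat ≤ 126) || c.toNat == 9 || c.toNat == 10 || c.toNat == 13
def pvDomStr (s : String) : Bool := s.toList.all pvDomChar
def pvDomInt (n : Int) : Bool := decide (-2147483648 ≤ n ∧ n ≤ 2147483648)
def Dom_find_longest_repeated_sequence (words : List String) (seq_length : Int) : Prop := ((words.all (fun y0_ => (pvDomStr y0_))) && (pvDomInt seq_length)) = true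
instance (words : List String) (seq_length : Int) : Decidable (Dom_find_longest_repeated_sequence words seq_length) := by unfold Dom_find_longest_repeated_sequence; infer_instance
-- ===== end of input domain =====

-- B drops A's Counter/dict-filter/max pipeline entirely: a count-and-remove loop that repeatedly
-- counts the first remaining window sequence with list.count, updates a running best, and deletes
-- all its occurrences (objective: alternative algorithm, no hash counting; not claimed faster).

-- ===== PORT A =====
def find_longest_repeated_sequence (words : List String) (seq_length : Int) : Option (String × Int) :=
  -- sequences = [' '.join(words[i:i + seq_length]) for i in range(len(words) - seq_length + 1)]
  let sequences : List String :=
    (PySem.List.pyRange 0 (PySem.List.len words - seq_length + 1) 1).map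
      (fun i => PySem.Str.join " " (PySem.List.slice words (some i) (some (i + seq_length))))
  -- sequence_counts = Counter(sequences)
  let sequence_counts := PySem.Dict.counter sequences
  -- repeated_sequences = {seq: count for seq, count in sequence_counts.items() if count > 1}
  -- (keys of sequence_counts are distinct, so Dict.mk of the filtered items IS that dict)
  let repeated_sequences : PySem.Dict String Int :=
    PySem.Dict.mk (sequence_counts.items.filter (fun p => decide (1 < p.2)))
  -- if repeated_sequences: longest = max(repeated_sequences, key=len); return longest, repeated_sequences[longest]
  if repeated_sequences.items.isEmpty then none
  else
    match PySem.List.max? repeated_sequences.keys PySem.Str.len with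
    | some longest => some (longest, repeated_sequences.getD longest 0)
      -- repeated_sequences[longest]: the key is present (longest ∈ keys), so getD is exact
    | none => none  -- unreachable: the dict is nonempty here

-- ===== PORT B =====
-- the while-loop of Source B: take seqs[0], count it, maybe update best, strip all its occurrences
def pvScan : Option (String × Int) → List String → Option (String × Int)
  | best, [] => best
  | best, s :: rest =>
    -- c = seqs.count(s)
    let c : Int := (PySem.List.count (s :: rest) s : Int)
    -- if c > 1 and (best is None or len(s) > len(best[0])): best = (s, c)
    let best' : Option (String × Int) :=
      if (decide (1 < c) && (match best with
            | none => true
            | some b => decide (PySem.Str.len b.1 < PySem.Str.len s))) = true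
      then some (s, c) else best
    -- seqs = [t for t in seqs if t != s]
    pvScan best' ((s :: rest).filter (fun t => !(t == s)))
termination_by _ seqs => seqs.length
decreasing_by
  simp only [List.filter_cons, beq_self_eq_true, Bool.not_true, List.length_cons]
  exact Nat.lt_succ_of_le (List.length_filter_le _ _)

def find_longest_repeated_sequence_alt (words : List String) (seq_length : Int) : Option (String × Int) :=
  -- seqs = [' '.join(words[i:i + seq_length]) for i in range(len(words) - seq_length + 1)]
  let seqs : List String :=
    (PySem.List.pyRange 0 (PySem.List.len words - seq_length + 1) 1).map
      (fun i => PySem.Str.join " " (PySem.List.slice words (some i) (some (i + seq_length))))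
  -- best = None; while seqs: … ; return best
  pvScan none seqs

-- ===== PRECONDITION & SPEC =====
def Spec_find_longest_repeated_sequence (words : List String) (seq_length : Int) (out : Option (String × Int)) : Prop := out = find_longest_repeated_sequence_alt words seq_length
instance (words : List String) (seq_length : Int) (out : Option (String × Int)) : Decidable (Spec_find_longest_repeated_sequence words seq_length out) := by unfold Spec_find_longest_repeated_sequence; infer_instance

-- ===== CLAIM (what is proved, stated in full; the proofs are below) =====
def Claim_equal_find_longest_repeated_sequence : Prop := ∀ (words : List String) (seq_length : Int), Dom_find_longest_repeated_sequence words seq_length → Spec_find_longest_repeated_sequence words seq_length (find_longest_repeated_sequence words seq_length)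

-- ===== LEMMAS AND PROOFS =====

-- one step of B's loop, as a function of the list whose counts it reads
def pvStep (l : List String) (b : Option (String × Int)) (s : String) : Option (String × Int) :=
  if (decide (1 < ((PySem.List.count l s : Nat) : Int)) && (match b with
        | none => true
        | some p => decide (PySem.Str.len p.1 < PySem.Str.len s))) = true
  then some (s, ((PySem.List.count l s : Nat) : Int)) else b

-- filtering out a value already in the accumulator does not change the Set fold
theorem pv_foldl_add_filter (l : List String) (acc : PySem.Set String) (s : String)
    (hs : s ∈ acc) :
    (l.filter (fun t => !(t == s))).foldl PySem.Set.add acc = l.foldl PySem.Set.add acc := by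
  induction l generalizing acc with
  | nil => rfl
  | cons x t ih =>
    by_cases hx : x = s
    · subst hx
      have hadd : PySem.Set.add acc x = acc := by
        simp [PySem.Set.add, PySem.Set.contains, hs]
      simp only [List.filter_cons, beq_self_eq_true, Bool.not_true, List.foldl_cons, hadd]
      exact ih acc hs
    · simp only [List.filter_cons, Bool.not_eq_eq_eq_not, Bool.not_true,
        beq_eq_false_iff_ne, ne_eq, hx, not_false_eq_true, List.foldl_cons]
      exact ih _ ((PySem.Set.mem_add acc x s).mpr (Or.inl hs))

-- a head the tail never mentions stays in front of the Set fold
theorem pv_foldl_add_cons (l : List String) (acc : List String) (s : String)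
    (h : ∀ t ∈ l, ¬ t = s) :
    l.foldl PySem.Set.add (s :: acc) = s :: l.foldl PySem.Set.add acc := by
  induction l generalizing acc with
  | nil => rfl
  | cons x t ih =>
    have hx : ¬ x = s := h x (List.mem_cons_self ..)
    have hadd : PySem.Set.add (s :: acc) x = s :: PySem.Set.add acc x := by
      simp only [PySem.Set.add, PySem.Set.contains, List.contains_cons]
      have hxs : (x == s) = false := by simpa using hx
      simp only [hxs, Bool.false_or]
      by_cases hm : x ∈ acc
      · simp [hm]
      · simp [hm]
    simp only [List.foldl_cons, hadd]
    exact ih _ (fun y hy => h y (List.mem_cons_of_mem _ hy))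

-- first-occurrence dedup of s :: rest = s followed by the dedup of rest with s removed
theorem pv_dedup_cons (s : String) (rest : List String) :
    PySem.List.dedup (s :: rest)
      = s :: PySem.List.dedup (rest.filter (fun t => !(t == s))) := by
  have h1 : PySem.List.dedup (s :: rest) = rest.foldl PySem.Set.add [s] := by
    simp [PySem.List.dedup, PySem.Set.ofList, PySem.Set.add, PySem.Set.empty,
      PySem.Set.contains]
  have h2 : rest.foldl PySem.Set.add [s]
      = (rest.filter (fun t => !(t == s))).foldl PySem.Set.add [s] :=
    (pv_foldl_add_filter rest [s] s (by simp)).symm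
  have h3 : (rest.filter (fun t => !(t == s))).foldl PySem.Set.add ([s] : List String)
      = s :: (rest.filter (fun t => !(t == s))).foldl PySem.Set.add [] := by
    refine pv_foldl_add_cons _ [] s ?_
    intro t ht
    have := List.of_mem_filter ht
    simpa using this
  rw [h1, h2, h3]
  rfl

-- counts of survivors are unchanged by removing all occurrences of s
theorem pv_count_filter (l : List String) (s t : String) (ht : ¬ t = s) :
    PySem.List.count (l.filter (fun x => !(x == s))) t = PySem.List.count l t := by
  simp only [PySem.List.count]
  exact List.count_filter (by simpa using ht)

-- B's loop = a fold of pvStep over the distinct sequences in first-occurrence order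
theorem pvScan_eq (l : List String) (best : Option (String × Int)) :
    pvScan best l = (PySem.List.dedup l).foldl (pvStep l) best := by
  match l with
  | [] => rw [pvScan.eq_def]; rfl
  | s :: rest =>
    have hstep : pvScan best (s :: rest)
        = pvScan (pvStep (s :: rest) best s) ((s :: rest).filter (fun t => !(t == s))) := by
      rw [pvScan.eq_def]; rfl
    have hlen : ((s :: rest).filter (fun t => !(t == s))).length < (s :: rest).length := by
      simp only [List.filter_cons, beq_self_eq_true, Bool.not_true, List.length_cons]
      exact Nat.lt_succ_of_le (List.length_filter_le _ _)
    rw [hstep, pvScan_eq ((s :: rest).filter (fun t => !(t == s)))]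
    have hcongr :
        (PySem.List.dedup ((s :: rest).filter (fun t => !(t == s)))).foldl
          (pvStep ((s :: rest).filter (fun t => !(t == s)))) (pvStep (s :: rest) best s)
        = (PySem.List.dedup ((s :: rest).filter (fun t => !(t == s)))).foldl
          (pvStep (s :: rest)) (pvStep (s :: rest) best s) := by
      refine PySem.List.foldl_congr_mem _ _ _ _ ?_
      intro acc x hx
      have hxm : x ∈ (s :: rest).filter (fun t => !(t == s)) := by
        have := (PySem.List.mem_dedup _ _).mp hx
        exact this
      have hxs : ¬ x = s := by
        have := List.of_mem_filter hxm
        simpa using this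
      simp only [pvStep, pv_count_filter (s :: rest) s x hxs]
    have hfc : (s :: rest).filter (fun t => !(t == s))
        = rest.filter (fun t => !(t == s)) := by
      simp
    rw [hcongr, pv_dedup_cons s rest, List.foldl_cons, hfc]
termination_by l.length
decreasing_by
  simp only [List.filter_cons, beq_self_eq_true, Bool.not_true, List.length_cons]
  exact Nat.lt_succ_of_le (List.length_filter_le _ _)

-- the condition-and-update fold tracks Python's max(…, key=len) fold, paired with the count
theorem pv_foldl_update_eq_max (cnt : String → Int) (cand : List String) (o : Option String) :
    cand.foldl
      (fun b s => if (match b with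
          | none => true
          | some p => decide (PySem.Str.len p.1 < PySem.Str.len s)) = true
        then some (s, cnt s) else b)
      (o.map (fun w => (w, cnt w)))
    = (cand.foldl
        (fun a x => match a with
          | none => some x
          | some m => if PySem.Str.len m < PySem.Str.len x then some x else some m)
        o).map (fun w => (w, cnt w)) := by
  induction cand generalizing o with
  | nil => rfl
  | cons x t ih =>
    cases o with
    | none => simpa using ih (some x)
    | some m =>
      by_cases h : m.length < x.length
      · simpa [PySem.Str.len, h] using ih (some x)
      · simpa [PySem.Str.len, h] using ih (some m)

-- the first element equal to w in a list containing w is w itself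
theorem pv_find?_beq_self (w : String) (cand : List String) (h : w ∈ cand) :
    List.find? (fun k => k == w) cand = some w := by
  induction cand with
  | nil => simp at h
  | cons x t ih =>
    by_cases hx : x = w
    · simp [hx]
    · rw [List.find?_cons_of_neg (by simpa using hx)]
      rcases List.mem_cons.mp h with rfl | hm
      · exact absurd rfl hx
      · exact ih hm

-- ===== VERDICT (by name: the statement is the Claim_ definition above) =====
theorem find_longest_repeated_sequence_spec : Claim_equal_find_longest_repeated_sequence := by
  intro words seq_length _hdom
  unfold Spec_find_longest_repeated_sequence
  unfold find_longest_repeated_sequence find_longest_repeated_sequence_alt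
  simp only []
  set seqs : List String :=
    (PySem.List.pyRange 0 (PySem.List.len words - seq_length + 1) 1).map
      (fun i => PySem.Str.join " " (PySem.List.slice words (some i) (some (i + seq_length))))
    with hs
  -- normalize B: its loop is a fold over the dedup, then a fold over the repeated candidates
  rw [pvScan_eq]
  have hsplit : ∀ (b : Option (String × Int)) (s : String),
      pvStep seqs b s
      = if (fun s => decide (1 < ((PySem.List.count seqs s : Nat) : Int))) s = true
        then (fun b s => if (match b with
            | none => true
            | some p => decide (PySem.Str.len p.1 < PySem.Str.len s)) = true
          then some (s, ((PySem.List.count seqs s : Nat) : Int)) else b) b s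
        else b := by
    intro b s
    simp only [pvStep]
    by_cases h1 : 1 < List.count s seqs
    · by_cases h2 : (match b with
          | none => true
          | some p => decide (PySem.Str.len p.1 < PySem.Str.len s)) = true
      · simp [PySem.List.count, h1]
      · simp [PySem.List.count, h1]
    · simp [PySem.List.count, h1]
  rw [PySem.List.foldl_congr_mem _ _ _ _ (fun acc x _ => hsplit acc x),
    PySem.List.foldl_if_eq_foldl_filter]
  set cand : List String :=
    (PySem.List.dedup seqs).filter
      (fun s => decide (1 < ((PySem.List.count seqs s : Nat) : Int)))
    with hcand
  have hB := pv_foldl_update_eq_max (fun s => ((PySem.List.count seqs s : Nat) : Int)) cand none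
  simp only [Option.map_none] at hB
  rw [hB]
  -- normalize A: Counter items, filtered, are cand paired with counts
  have hitems : (PySem.Dict.counter seqs).items.filter (fun p => decide (1 < p.2))
      = cand.map (fun k => (k, ((PySem.List.count seqs k : Nat) : Int))) := by
    rw [PySem.Dict.items_counter, List.filter_map]
    rw [hcand, PySem.List.dedup_eq_ofList]
    rfl
  rw [hitems]
  have hkeys : (PySem.Dict.mk
      (cand.map (fun k => (k, ((PySem.List.count seqs k : Nat) : Int))))).keys = cand := by
    simp only [PySem.Dict.keys, List.map_map]
    exact List.map_id cand
  by_cases hemp : cand = []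
  · simp [hemp]
  · have hne : cand.map (fun k => (k, ((PySem.List.count seqs k : Nat) : Int))) ≠ [] := by
      simpa using hemp
    simp only [List.isEmpty_iff, hne, if_false]
    rw [hkeys]
    obtain ⟨w, hw⟩ : ∃ w, PySem.List.max? cand PySem.Str.len = some w := by
      cases h : PySem.List.max? cand PySem.Str.len with
      | none => exact absurd ((PySem.List.max?_eq_none_iff _ _).mp h) hemp
      | some w => exact ⟨w, rfl⟩
    have hwmem : w ∈ cand := PySem.List.max?_mem hw
    have hfind := pv_find?_beq_self w cand hwmem
    have hmax : PySem.List.max? cand PySem.Str.len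
        = cand.foldl
          (fun a x => match a with
            | none => some x
            | some m => if PySem.Str.len m < PySem.Str.len x then some x else some m)
          none := by
      unfold PySem.List.max?
      congr 1
      funext a x
      cases a <;> rfl
    rw [← hmax, hw]
    have hf2 : List.find?
        ((fun p => p.1 == w) ∘ fun k => (k, ((PySem.List.count seqs k : Nat) : Int))) cand
        = some w := hfind
    simp only [PySem.Dict.getD, PySem.Dict.get?, List.find?_map, hf2]
    rfl
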